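-- pv_equiv track=rewrite | github.com/vidyaai/vidya_ai_backend | summarize_lecture/utils/pdf_generator.py | _parse_section_content
-- ===== SOURCE A (Python) =====
-- from typing import Dict, List, Any, Optional
--
-- def _parse_section_content(content: str) -> List[Dict[str, str]]:
--     """Parse key concepts section with subsections."""
--     sections = []
--     lines = content.split("\n")
--     current_subsection = None
--     current_points = []
--
--     for line in lines:
--         line = line.strip()
--         if line.startswith("### "):
--             # Save previous subsection
--             if current_subsection:
--                 sections.append(
--                     {
--                         "title": current_subsection,
--                         "content": "\n".join(current_points),
--                     }
--                 )
--
--             # Start new subsection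
--             current_subsection = line[4:].strip()
--             current_points = []
--         elif line and current_subsection:
--             current_points.append(line)
--
--     # Add last subsection
--     if current_subsection:
--         sections.append(
--             {"title": current_subsection, "content": "\n".join(current_points)}
--         )
--
--     return sections
-- ===== SOURCE B (Python) =====
-- def _parse_section_content(content: str):
--     """Two-phase: strip all lines, skip to the first header, then emit one
--     block per header by scanning to the next header (no per-line state machine)."""
--     lines = [ln.strip() for ln in content.split("\n")]
--     n = len(lines)
--     i = 0
--     while i < n and not lines[i].startswith("### "):
--         i += 1
--     sections = []
--     while i < n:
--         title = lines[i][4:].strip()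
--         j = i + 1
--         while j < n and not lines[j].startswith("### "):
--             j += 1
--         if title:
--             body = [ln for ln in lines[i + 1 : j] if ln]
--             sections.append({"title": title, "content": "\n".join(body)})
--         i = j
--     return sections
-- ===== Notes on version B (the rewrite author's own statement) =====
-- stated objective: simpler
-- what changed: A's single pass with mutable accumulator state (current_subsection/current_points plus an end-of-loop flush) is replaced by a two-phase decomposition: strip all lines, skip to the first header, then for each header scan forward to the next header and slice that segment into a section, so no cross-iteration state machine or final flush is needed.
import Mathlib
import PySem

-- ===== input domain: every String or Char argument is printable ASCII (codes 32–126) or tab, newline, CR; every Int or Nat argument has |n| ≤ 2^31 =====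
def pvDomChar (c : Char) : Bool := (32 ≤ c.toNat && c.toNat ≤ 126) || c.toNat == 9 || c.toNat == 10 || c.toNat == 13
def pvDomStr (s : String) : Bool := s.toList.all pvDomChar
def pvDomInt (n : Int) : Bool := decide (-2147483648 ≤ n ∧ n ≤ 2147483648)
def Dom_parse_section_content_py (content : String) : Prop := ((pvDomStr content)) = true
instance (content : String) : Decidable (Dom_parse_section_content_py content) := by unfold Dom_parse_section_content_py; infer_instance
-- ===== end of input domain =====

-- B replaces A's per-line accumulator state machine by a two-phase scan (find each header,
-- then slice its segment); objective: simpler decomposition, same O(n) cost.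

-- content.split("\n")  (shared primitive; sep is non-empty so Python's split is total)
def pvLines (content : String) : List String :=
  (PySem.Chars.splitOn content.toList ['\n']).map String.ofList

-- ===== PORT A =====
-- loop body of A, on the already-stripped line (A strips first, then branches)
def pvStepA' (st : List (List (String × String)) × Option String × List String)
    (line : String) : List (List (String × String)) × Option String × List String :=
  if PySem.Str.startswith line "### " then
    let secs := if st.2.1.getD "" ≠ "" then
        st.1 ++ [[("title", st.2.1.getD ""), ("content", PySem.Str.join "\n" st.2.2)]]
      else st.1
    (secs, some (PySem.Str.strip (PySem.Str.slice line (some 4) none)), ([] : List String))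
  else if line ≠ "" ∧ st.2.1.getD "" ≠ "" then (st.1, st.2.1, st.2.2 ++ [line])
  else st

def pvStepA (st : List (List (String × String)) × Option String × List String)
    (rawLine : String) : List (List (String × String)) × Option String × List String :=
  pvStepA' st (PySem.Str.strip rawLine)

-- the trailing "add last subsection" of A
def pvFinishA (st : List (List (String × String)) × Option String × List String) :
    List (List (String × String)) :=
  if st.2.1.getD "" ≠ "" then
    st.1 ++ [[("title", st.2.1.getD ""), ("content", PySem.Str.join "\n" st.2.2)]]
  else st.1

def parse_section_content_py (content : String) : List (List (String × String)) :=
  pvFinishA ((pvLines content).foldl pvStepA ([], none, []))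

-- ===== PORT B =====
def pvNotHeader (l : String) : Bool := !PySem.Str.startswith l "### "

-- inner while loop of B: distance from here to the next header (or end)
def pvSpanB : List String → Nat
  | [] => 0
  | x :: xs => if PySem.Str.startswith x "### " then 0 else pvSpanB xs + 1

-- outer while loop of B: one block per header
def pvBlocksB : List String → List (List (String × String))
  | [] => []
  | h :: rest =>
    let title := PySem.Str.strip (PySem.Str.slice h (some 4) none)
    let k := pvSpanB rest
    let tail := pvBlocksB (rest.drop k)
    if title ≠ "" then
      [("title", title), ("content", PySem.Str.join "\n" ((rest.take k).filter (fun l => l ≠ "")))] :: tail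
    else tail
  termination_by l => l.length
  decreasing_by simp only [List.length_drop, List.length_cons]; omega

def parse_section_content_py_alt (content : String) : List (List (String × String)) :=
  pvBlocksB (((pvLines content).map PySem.Str.strip).dropWhile pvNotHeader)

-- ===== PRECONDITION & SPEC =====
def Spec_parse_section_content_py (content : String) (out : List (List (String × String))) : Prop := out = parse_section_content_py_alt content
instance (content : String) (out : List (List (String × String))) : Decidable (Spec_parse_section_content_py content out) := by unfold Spec_parse_section_content_py; infer_instance

-- ===== CLAIM (what is proved, stated in full; the proofs are below) =====
def Claim_equal_parse_section_content_py : Prop := ∀ (content : String), Dom_parse_section_content_py content → Spec_parse_section_content_py content (parse_section_content_py content)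

-- ===== LEMMAS AND PROOFS =====
theorem pvBlocksB_nil : pvBlocksB [] = [] := by rw [pvBlocksB.eq_def]

theorem pvBlocksB_cons (h : String) (rest : List String) :
    pvBlocksB (h :: rest) =
      (if PySem.Str.strip (PySem.Str.slice h (some 4) none) ≠ "" then
        [("title", PySem.Str.strip (PySem.Str.slice h (some 4) none)),
         ("content", PySem.Str.join "\n" ((rest.takeWhile pvNotHeader).filter (fun s => s ≠ "")))] ::
          pvBlocksB (rest.dropWhile pvNotHeader)
       else pvBlocksB (rest.dropWhile pvNotHeader)) := by
  have hTake : ∀ l : List String, l.take (pvSpanB l) = l.takeWhile pvNotHeader := by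
    intro l
    induction l with
    | nil => rfl
    | cons x xs ih =>
      by_cases hx : PySem.Chars.startswith x.toList ['#', '#', '#', ' '] = true <;>
        simp [pvSpanB, pvNotHeader, hx, ih]
  have hDrop : ∀ l : List String, l.drop (pvSpanB l) = l.dropWhile pvNotHeader := by
    intro l
    induction l with
    | nil => rfl
    | cons x xs ih =>
      by_cases hx : PySem.Chars.startswith x.toList ['#', '#', '#', ' '] = true <;>
        simp [pvSpanB, pvNotHeader, hx, ih]
  rw [pvBlocksB.eq_def]
  simp only [hTake, hDrop]

theorem pvMain (L : List String) : ∀ secs cur pts,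
    pvFinishA (L.foldl pvStepA' (secs, cur, pts)) =
      secs ++
        (if cur.getD "" ≠ "" then
          [[("title", cur.getD ""),
            ("content", PySem.Str.join "\n" (pts ++ (L.takeWhile pvNotHeader).filter (fun l => l ≠ "")))]]
         else []) ++
        pvBlocksB (L.dropWhile pvNotHeader) := by
  induction L with
  | nil =>
    intro secs cur pts
    simp only [List.foldl_nil, List.takeWhile_nil, List.dropWhile_nil, List.filter_nil,
      List.append_nil, pvBlocksB_nil, pvFinishA]
    split_ifs <;> simp
  | cons l rest ih =>
    intro secs cur pts
    by_cases hh : PySem.Chars.startswith l.toList ['#', '#', '#', ' '] = true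
    · have hstep : pvStepA' (secs, cur, pts) l =
        ((if cur.getD "" ≠ "" then
            secs ++ [[("title", cur.getD ""), ("content", PySem.Str.join "\n" pts)]]
          else secs),
         some (PySem.Str.strip (PySem.Str.slice l (some 4) none)), ([] : List String)) := by
        simp [pvStepA', hh]
      have hdw : (l :: rest).dropWhile pvNotHeader = l :: rest := by
        simp [pvNotHeader, hh]
      have htw : (l :: rest).takeWhile pvNotHeader = ([] : List String) := by
        simp [pvNotHeader, hh]
      rw [List.foldl_cons, hstep, ih, hdw, htw, pvBlocksB_cons]
      simp only [Option.getD_some, List.filter_nil, List.append_nil, List.nil_append]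
      split_ifs <;> simp_all
    · have hdw : (l :: rest).dropWhile pvNotHeader = rest.dropWhile pvNotHeader := by
        simp [pvNotHeader, hh]
      have htw : (l :: rest).takeWhile pvNotHeader = l :: rest.takeWhile pvNotHeader := by
        simp [pvNotHeader, hh]
      by_cases hc : cur.getD "" ≠ ""
      · by_cases hl : l = ""
        · subst hl
          have hs0 : PySem.Chars.startswith ([] : List Char) ['#', '#', '#', ' '] = false := by
            decide
          have hstep : pvStepA' (secs, cur, pts) "" = (secs, cur, pts) := by
            simp [pvStepA', hs0]
          rw [List.foldl_cons, hstep, ih, hdw, htw]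
          simp
        · have hstep : pvStepA' (secs, cur, pts) l = (secs, cur, pts ++ [l]) := by
            simp [pvStepA', hh, hl, hc]
          rw [List.foldl_cons, hstep, ih, hdw, htw]
          simp [hl]
      · have hstep : pvStepA' (secs, cur, pts) l = (secs, cur, pts) := by
          simp [pvStepA', hh, hc]
        rw [List.foldl_cons, hstep, ih, hdw, htw]
        simp [hc]

-- ===== VERDICT (by name: the statement is the Claim_ definition above) =====
theorem parse_section_content_py_spec : Claim_equal_parse_section_content_py := by
  intro content _
  show pvFinishA ((pvLines content).foldl pvStepA ([], none, [])) =
    pvBlocksB (((pvLines content).map PySem.Str.strip).dropWhile pvNotHeader)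
  have hfold : (pvLines content).foldl pvStepA ([], none, []) =
      ((pvLines content).map PySem.Str.strip).foldl pvStepA' ([], none, []) := by
    rw [List.foldl_map]
    rfl
  rw [hfold, pvMain]
  simp
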